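-- pv_equiv track=rewrite | github.com/Tridu33/SAVG | cps2FondandVerify/Simulator.py | parse_quantifier_objs2map
-- ===== SOURCE A (Python) =====
-- def parse_quantifier_objs2map(strobjs)->{}:
--     parameters = {}
--     untyped_parameters = []
--     p = strobjs
--     while p:
--         t = p.pop(0)
--         if t == '-':
--             if not untyped_parameters:
--                 raise Exception('Unexpected hyphen in ' + tc_name + ' parameters')
--             ptype = p.pop(0)
--             while untyped_parameters:
--                 OneOfUntyped_variableslist = untyped_parameters.pop(0)
--                 parameters[OneOfUntyped_variableslist]=ptype
--         else:
--             untyped_parameters.append(t)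
--     while untyped_parameters:
--         OneOfUntyped_variableslist = untyped_parameters.pop(0)
--         parameters[OneOfUntyped_variableslist]='object'
--     return parameters
-- ===== SOURCE B (Python) =====
-- def parse_quantifier_objs2map(strobjs) -> {}:
--     # Segment-based single pass: find the next '-', slice out the names before it,
--     # read the type after it, assign in one batch.  O(n); does not mutate strobjs.
--     parameters = {}
--     rest = strobjs
--     while rest:
--         for k, tok in enumerate(rest):
--             if tok == '-':
--                 break
--         else:
--             for name in rest:
--                 parameters[name] = 'object'
--             break
--         if k == 0:
--             raise Exception('Unexpected hyphen in parameters')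
--         ptype = rest[k + 1]
--         for name in rest[:k]:
--             parameters[name] = ptype
--         rest = rest[k + 2:]
--     return parameters
-- ===== Notes on version B (the rewrite author's own statement) =====
-- stated objective: faster
-- what changed: Replaces A's destructive pop(0)-driven loop with a pending-names buffer drained by nested whiles by a non-mutating segment scan: find the next '-', slice the names before it, read the type after it, and batch-assign per segment.
import Mathlib
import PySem

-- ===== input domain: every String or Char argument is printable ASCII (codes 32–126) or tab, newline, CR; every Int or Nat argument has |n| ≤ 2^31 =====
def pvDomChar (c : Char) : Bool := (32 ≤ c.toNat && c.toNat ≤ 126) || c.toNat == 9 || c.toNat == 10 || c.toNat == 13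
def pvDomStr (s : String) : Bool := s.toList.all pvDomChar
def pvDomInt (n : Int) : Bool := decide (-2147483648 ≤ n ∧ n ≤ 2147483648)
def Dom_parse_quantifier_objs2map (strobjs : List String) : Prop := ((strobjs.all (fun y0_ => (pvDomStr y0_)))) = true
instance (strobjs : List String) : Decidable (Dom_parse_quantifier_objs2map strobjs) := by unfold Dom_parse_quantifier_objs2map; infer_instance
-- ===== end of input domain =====

-- B replaces A's quadratic pop(0)/buffer-draining loop by a single O(n) segment scan
-- (find next '-', slice names, batch-assign the type); equivalence is about the RETURN
-- value only — Python A empties its argument list in place, B does not mutate it.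


-- ===== PORT A =====
-- "while untyped: parameters[untyped.pop(0)] = ptype" — drain the name list front-first,
-- inserting each into the dict (shared by both ports: B's "for name in …: parameters[name] = ptype"
-- is the same left-to-right insertion loop).
def pvAssign (d : PySem.Dict String String) (names : List String) (ptype : String) :
    PySem.Dict String String :=
  match names with
  | [] => d
  | x :: rest => pvAssign (d.insert x ptype) rest ptype

-- the outer "while p: t = p.pop(0) …" loop of A; on inputs where Python A raises
-- (hyphen with empty buffer: NameError; trailing hyphen: IndexError) it returns the
-- dict built so far — those inputs are excluded by Pre_.
def pvLoopA (d : PySem.Dict String String) (untyped : List String) (p : List String) :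
    PySem.Dict String String :=
  match p with
  | [] => pvAssign d untyped "object"
  | t :: rest =>
    if t = "-" then
      if untyped = [] then d          -- Python raises here (excluded by Pre_)
      else
        match rest with
        | [] => d                     -- Python raises here (p.pop(0) on empty; excluded by Pre_)
        | ptype :: rest' => pvLoopA (pvAssign d untyped ptype) [] rest'
    else pvLoopA d (untyped ++ [t]) rest

def parse_quantifier_objs2map (strobjs : List String) : List (String × String) :=
  (pvLoopA PySem.Dict.empty [] strobjs).items

-- ===== PORT B =====
-- Source B's "while rest:" — find first '-' (the for/enumerate with break = findIdx?),
-- slice names rest[:k] = take k, type rest[k+1], continue on rest[k+2:] = drop (k+2).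
-- Slice indices are nonnegative, so take/drop are exact.
def pvLoopB (d : PySem.Dict String String) (rest : List String) : PySem.Dict String String :=
  match rest with
  | [] => d
  | t :: r =>
    match (t :: r).findIdx? (· == "-") with
    | none => pvAssign d (t :: r) "object"
    | some k =>
      if k = 0 then d                 -- raise Exception (excluded by Pre_)
      else
        match PySem.List.pyGet? (t :: r) ((k : Int) + 1) with
        | none => d                   -- IndexError (excluded by Pre_)
        | some ptype => pvLoopB (pvAssign d ((t :: r).take k) ptype) ((t :: r).drop (k + 2))
termination_by rest.length
decreasing_by
  simp only [List.length_drop, List.length_cons]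
  omega

def parse_quantifier_objs2map_alt (strobjs : List String) : List (String × String) :=
  (pvLoopB PySem.Dict.empty strobjs).items

-- ===== PRECONDITION & SPEC =====
-- Recognizer for inputs on which Python A returns (no exception): the token list is
-- (names+ '-' type)* names*, i.e. every '-' marker is preceded by at least one buffered
-- name and followed by a type token.  hasBuf = "at least one name buffered so far".
def pvOk (hasBuf : Bool) (l : List String) : Bool :=
  match l with
  | [] => true
  | t :: rest =>
    if t = "-" then
      if hasBuf then
        match rest with
        | [] => false
        | _ :: r => pvOk false r
      else false
    else pvOk true rest

-- Pre_ excludes exactly the inputs where Python A raises: a '-' arriving with no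
-- buffered name (NameError/Exception) or a '-' marker as the last token (IndexError).
def Pre_parse_quantifier_objs2map (strobjs : List String) : Prop :=
  pvOk false strobjs = true
instance (strobjs : List String) : Decidable (Pre_parse_quantifier_objs2map strobjs) := by
  unfold Pre_parse_quantifier_objs2map; infer_instance

def pvWitness_parse_quantifier_objs2map : List String := ["x", "y", "-", "int", "z"]

def Spec_parse_quantifier_objs2map (strobjs : List String) (out : List (String × String)) : Prop := out = parse_quantifier_objs2map_alt strobjs
instance (strobjs : List String) (out : List (String × String)) : Decidable (Spec_parse_quantifier_objs2map strobjs out) := by unfold Spec_parse_quantifier_objs2map; infer_instance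

-- ===== CLAIM (what is proved, stated in full; the proofs are below) =====
def Claim_equal_parse_quantifier_objs2map : Prop := ∀ (strobjs : List String), Dom_parse_quantifier_objs2map strobjs → Pre_parse_quantifier_objs2map strobjs → Spec_parse_quantifier_objs2map strobjs (parse_quantifier_objs2map strobjs)

-- ===== LEMMAS AND PROOFS =====

-- unfolding equations for the two loops
theorem pvLoopA_nil (d : PySem.Dict String String) (u : List String) :
    pvLoopA d u [] = pvAssign d u "object" := by rw [pvLoopA]
theorem pvLoopA_dash_nilbuf (d : PySem.Dict String String) (rest : List String) :
    pvLoopA d [] ("-" :: rest) = d := by cases rest <;> (rw [pvLoopA]; simp)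
theorem pvLoopA_dash_last (d : PySem.Dict String String) (x : String) (xs : List String) :
    pvLoopA d (x :: xs) ["-"] = d := by rw [pvLoopA]; simp
theorem pvLoopA_dash_type (d : PySem.Dict String String) (x ptype : String) (xs rest' : List String) :
    pvLoopA d (x :: xs) ("-" :: ptype :: rest') = pvLoopA (pvAssign d (x :: xs) ptype) [] rest' := by
  rw [pvLoopA]; simp
theorem pvLoopA_name (d : PySem.Dict String String) (u : List String) (t : String)
    (rest : List String) (ht : ¬ t = "-") :
    pvLoopA d u (t :: rest) = pvLoopA d (u ++ [t]) rest := by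
  cases rest <;> (conv_lhs => rw [pvLoopA]) <;> rw [if_neg ht]
theorem pvLoopB_nil (d : PySem.Dict String String) : pvLoopB d [] = d := by rw [pvLoopB]
theorem pvLoopB_cons (d : PySem.Dict String String) (t : String) (r : List String) :
    pvLoopB d (t :: r) =
      match (t :: r).findIdx? (· == "-") with
      | none => pvAssign d (t :: r) "object"
      | some k =>
        if k = 0 then d
        else
          match PySem.List.pyGet? (t :: r) ((k : Int) + 1) with
          | none => d
          | some ptype => pvLoopB (pvAssign d ((t :: r).take k) ptype) ((t :: r).drop (k + 2)) := by
  rw [pvLoopB]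
theorem findIdx_dash_append (u rest : List String) (h : "-" ∉ u) :
    (u ++ "-" :: rest).findIdx? (· == "-") = some u.length := by
  induction u with
  | nil => simp [List.findIdx?_cons]
  | cons x xs ih =>
    simp only [List.mem_cons, not_or] at h
    have hx : ¬ x = "-" := fun hh => h.1 hh.symm
    simp [List.findIdx?_cons, hx, ih h.2]

theorem findIdx_no_dash (l : List String) (h : "-" ∉ l) :
    l.findIdx? (· == "-") = none := by
  rw [List.findIdx?_eq_none_iff]
  intro x hx
  rw [beq_eq_false_iff_ne]
  rintro rfl
  exact h hx

theorem pvLoop_eq_aux : ∀ (n : Nat) (p : List String), p.length ≤ n →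
    ∀ (untyped : List String) (d : PySem.Dict String String),
      "-" ∉ untyped → pvLoopA d untyped p = pvLoopB d (untyped ++ p) := by
  intro n
  induction n with
  | zero =>
    intro p hp u d hu
    have : p = [] := List.eq_nil_of_length_eq_zero (Nat.le_zero.mp hp)
    subst this
    rw [pvLoopA_nil, List.append_nil]
    cases u with
    | nil => rw [pvLoopB_nil, pvAssign]
    | cons x xs => rw [pvLoopB_cons, findIdx_no_dash _ hu]
  | succ n ih =>
    intro p hp u d hu
    cases p with
    | nil =>
      rw [pvLoopA_nil, List.append_nil]
      cases u with
      | nil => rw [pvLoopB_nil, pvAssign]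
      | cons x xs => rw [pvLoopB_cons, findIdx_no_dash _ hu]
    | cons t rest =>
      simp only [List.length_cons, Nat.add_le_add_iff_right] at hp
      by_cases ht : t = "-"
      · subst ht
        cases u with
        | nil =>
          rw [pvLoopA_dash_nilbuf, List.nil_append, pvLoopB_cons]
          simp [List.findIdx?_cons]
        | cons x xs =>
          cases rest with
          | nil =>
            rw [pvLoopA_dash_last]
            rw [show (x :: xs) ++ ["-"] = x :: (xs ++ ["-"]) from rfl, pvLoopB_cons]
            rw [show x :: (xs ++ ["-"]) = (x :: xs) ++ "-" :: ([] : List String) from rfl,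
                findIdx_dash_append _ _ hu]
            have hlen : ((x :: xs).length : Int) + 1 = (((x :: xs).length + 1 : Nat) : Int) := by
              push_cast; ring
            simp only [hlen, PySem.List.pyGet?_natCast]
            rw [if_neg (by simp)]
            rw [List.getElem?_eq_none (by simp)]
          | cons ptype rest' =>
            simp only [List.length_cons] at hp
            rw [pvLoopA_dash_type,
                ih rest' (by omega) [] (pvAssign d (x :: xs) ptype) (by simp), List.nil_append]
            rw [show (x :: xs) ++ "-" :: ptype :: rest' = x :: (xs ++ "-" :: ptype :: rest') from rfl,
                pvLoopB_cons,
                show x :: (xs ++ "-" :: ptype :: rest') = (x :: xs) ++ "-" :: ptype :: rest' from rfl,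
                findIdx_dash_append _ _ hu]
            have hlen : ((x :: xs).length : Int) + 1 = (((x :: xs).length + 1 : Nat) : Int) := by
              push_cast; ring
            simp only [hlen, PySem.List.pyGet?_natCast]
            rw [if_neg (by simp)]
            have hget : (x :: xs ++ "-" :: ptype :: rest')[(x :: xs).length + 1]? = some ptype := by
              rw [List.getElem?_append_right (by simp)]
              simp
            have htake : (x :: xs ++ "-" :: ptype :: rest').take (x :: xs).length = x :: xs :=
              List.take_left ..
            have hdrop : (x :: xs ++ "-" :: ptype :: rest').drop ((x :: xs).length + 2) = rest' := by
              rw [show (x :: xs).length + 2 = ((x :: xs) ++ ["-", ptype]).length by simp,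
                  show x :: xs ++ "-" :: ptype :: rest' = ((x :: xs) ++ ["-", ptype]) ++ rest' by simp]
              exact List.drop_left ..
            rw [hget, htake, hdrop]
      · have hu' : "-" ∉ u ++ [t] := by
          simp only [List.mem_append, List.mem_singleton, not_or]
          exact ⟨hu, fun hh => ht hh.symm⟩
        rw [pvLoopA_name d u t rest ht, ih rest hp (u ++ [t]) d hu', List.append_assoc,
            List.singleton_append]

theorem parse_quantifier_objs2map_spec : Claim_equal_parse_quantifier_objs2map := by
  intro strobjs _ _
  unfold Spec_parse_quantifier_objs2map parse_quantifier_objs2map parse_quantifier_objs2map_alt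
  rw [pvLoop_eq_aux strobjs.length strobjs (Nat.le_refl _) [] PySem.Dict.empty (by simp),
      List.nil_append]
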